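-- pv_equiv track=rewrite | github.com/jessding/6.009sp21 | lab3/lab.py | actors_with_bfs_number
-- ===== SOURCE A (Python) =====
-- def actors_with_bfs_number(data, n, actor_id):
--     """
--     performs BFS, but doesn't include actors we've encountered before in the subsequent level sets.
--     Also, returns early if level set is already empty at a smaller bacon number.
--     """
--     data = data[0]
--     bacon = actor_id
--     level = {bacon}
--     seen = {bacon}
--     for i in range(n):
--         new_level = set()
--         for x in level:
--             new_level |= set([y[0] for y in data[x] if not y[0] in seen])
--         level = new_level
--         seen |= new_level
--         if not new_level:
--             return set()
--     return level
-- ===== SOURCE B (Python) =====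
-- def actors_with_bfs_number(data, n, actor_id):
--     """Single-queue BFS with a distance map; the answer is the set of keys
--     whose recorded distance is exactly n."""
--     graph = data[0]
--     if n <= 0:
--         return {actor_id}
--     dist = {actor_id: 0}
--     queue = [actor_id]
--     head = 0
--     while head < len(queue):
--         node = queue[head]
--         head += 1
--         d = dist[node]
--         if d < n:
--             for nb, _ in graph[node]:
--                 if nb not in dist:
--                     dist[nb] = d + 1
--                     queue.append(nb)
--     return {a for a, d in dist.items() if d == n}
-- ===== Notes on version B (the rewrite author's own statement) =====
-- stated objective: alternative
-- what changed: A's level-by-level BFS with frontier/seen sets and per-level set unions is replaced by a single-queue BFS over a distance dictionary; the answer is read off as the keys recorded at distance exactly n.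
-- outside the precondition, e.g. on actors_with_bfs_number([{1: [], 2: [(9, 0)]}], 2, 1): A returns set(), B returns set()
import Mathlib
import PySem

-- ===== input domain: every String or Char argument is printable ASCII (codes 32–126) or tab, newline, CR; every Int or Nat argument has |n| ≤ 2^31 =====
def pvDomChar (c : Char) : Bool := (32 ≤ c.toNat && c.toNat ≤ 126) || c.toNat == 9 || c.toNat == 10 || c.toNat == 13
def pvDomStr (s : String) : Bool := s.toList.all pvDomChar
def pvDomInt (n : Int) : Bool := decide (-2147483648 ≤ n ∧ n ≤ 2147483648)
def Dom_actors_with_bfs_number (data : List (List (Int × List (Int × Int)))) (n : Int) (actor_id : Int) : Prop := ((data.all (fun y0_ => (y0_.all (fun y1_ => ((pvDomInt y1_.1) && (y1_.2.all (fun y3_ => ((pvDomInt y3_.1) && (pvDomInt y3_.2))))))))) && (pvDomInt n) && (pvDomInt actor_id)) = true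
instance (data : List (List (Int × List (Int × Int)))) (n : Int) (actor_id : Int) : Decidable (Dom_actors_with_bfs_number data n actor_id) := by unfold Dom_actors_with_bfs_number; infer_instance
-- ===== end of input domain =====

-- B replaces A's level-by-level frontier-set BFS by a single-queue BFS over a distance
-- dictionary, reading the answer off as the keys recorded at distance n (objective: alternative).

-- ===== PORT A =====
-- Python's `data[x]` (dict lookup, first match); KeyError inputs are excluded by Pre_, here the default [] is returned.
def pvAdj (graph : List (Int × List (Int × Int))) (x : Int) : List (Int × Int) :=
  (PySem.Dict.mk graph).getD x []

-- inner `for x in level: new_level |= set([y[0] for y in data[x] if not y[0] in seen])`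
def pvAExpand (graph : List (Int × List (Int × Int))) (seen level : PySem.Set Int) : PySem.Set Int :=
  level.foldl (fun new_level x =>
    PySem.Set.union new_level (PySem.Set.ofList
      (((pvAdj graph x).filter (fun y => !(PySem.Set.contains seen y.1))).map (fun y => y.1))))
    PySem.Set.empty

-- `for i in range(n): ...` with the early `return set()`
def pvALoop (graph : List (Int × List (Int × Int))) : Nat → PySem.Set Int → PySem.Set Int → List Int
  | 0, level, _seen => level
  | k + 1, level, seen =>
    let new_level := pvAExpand graph seen level
    if new_level = [] then []
    else pvALoop graph k new_level (PySem.Set.union seen new_level)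

def actors_with_bfs_number (data : List (List (Int × List (Int × Int)))) (n : Int) (actor_id : Int) : List Int :=
  let graph := (PySem.List.pyGet? data 0).getD []   -- data[0]; IndexError (data = []) excluded by Pre_
  pvALoop graph n.toNat (PySem.Set.add PySem.Set.empty actor_id) (PySem.Set.add PySem.Set.empty actor_id)

-- ===== PORT B =====
-- body of `for nb, _ in graph[node]: if nb not in dist: dist[nb] = d+1; queue.append(nb)`
def pvBStep (w : Int) (p : PySem.Dict Int Int × List Int) (y : Int × Int) : PySem.Dict Int Int × List Int :=
  if p.1.contains y.1 then p else (p.1.insert y.1 w, p.2 ++ [y.1])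

-- proof/termination helper: the fresh neighbours of one adjacency list, first occurrences, S = already-known keys
def pvNew (S : List Int) : List (Int × Int) → List Int
  | [] => []
  | y :: adj => if y.1 ∈ S then pvNew S adj else y.1 :: pvNew (S ++ [y.1]) adj

theorem pvNew_mem (adj : List (Int × Int)) :
    ∀ (S : List Int), ∀ z ∈ pvNew S adj, z ∈ adj.map (fun y => y.1) ∧ z ∉ S := by
  induction adj with
  | nil => intro S z hz; simp [pvNew] at hz
  | cons y adj ih =>
    intro S z hz
    simp only [pvNew] at hz
    by_cases h : y.1 ∈ S
    · rw [if_pos h] at hz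
      obtain ⟨h1, h2⟩ := ih S z hz
      exact ⟨by simp [h1], h2⟩
    · rw [if_neg h] at hz
      rcases List.mem_cons.mp hz with hz | hz
      · subst hz; exact ⟨by simp, h⟩
      · obtain ⟨h1, h2⟩ := ih (S ++ [y.1]) z hz
        refine ⟨by simp [h1], fun hc => h2 (by simp [hc])⟩

theorem pvNew_nodup (adj : List (Int × Int)) : ∀ (S : List Int), (pvNew S adj).Nodup := by
  induction adj with
  | nil => intro S; simp [pvNew]
  | cons y adj ih =>
    intro S
    simp only [pvNew]
    by_cases h : y.1 ∈ S
    · rw [if_pos h]; exact ih S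
    · rw [if_neg h]
      refine List.nodup_cons.mpr ⟨fun hc => ?_, ih (S ++ [y.1])⟩
      exact (pvNew_mem adj (S ++ [y.1]) _ hc).2 (by simp)

-- the inner fold appends exactly the fresh neighbours to both the dict and the queue
theorem pvBStep_fold (w : Int) (adj : List (Int × Int)) :
    ∀ (dist : PySem.Dict Int Int) (ns : List Int),
      (adj.foldl (pvBStep w) (dist, ns)).2 = ns ++ pvNew dist.keys adj ∧
      (adj.foldl (pvBStep w) (dist, ns)).1.items
        = dist.items ++ (pvNew dist.keys adj).map (fun z => (z, w)) := by
  induction adj with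
  | nil => intro dist ns; simp [pvNew]
  | cons y adj ih =>
    intro dist ns
    simp only [List.foldl_cons, pvBStep, pvNew]
    by_cases h : dist.contains y.1
    · rw [if_pos h, if_pos ((PySem.Dict.contains_iff_mem_keys _ _).mp h)]
      exact ih dist ns
    · have hmem : y.1 ∉ dist.keys := fun hc => h ((PySem.Dict.contains_iff_mem_keys _ _).mpr hc)
      rw [if_neg h, if_neg hmem]
      obtain ⟨h1, h2⟩ := ih (dist.insert y.1 w) (ns ++ [y.1])
      have hb : Bool.not (dist.contains y.1) = true := by simp [h]
      have hk : (dist.insert y.1 w).keys = dist.keys ++ [y.1] :=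
        PySem.Dict.keys_insert_of_not_contains _ _ (by simp [h])
      have hi : (dist.insert y.1 w).items = dist.items ++ [(y.1, w)] :=
        PySem.Dict.items_insert_of_not_contains _ _ (by simp [h])
      constructor
      · rw [h1, hk]; simp
      · rw [h2, hk, hi]; simp

-- all ids that can ever be newly inserted (termination measure universe)
def pvUniv (graph : List (Int × List (Int × Int))) : PySem.Set Int :=
  PySem.Set.ofList (graph.flatMap (fun e => e.2.map (fun y => y.1)))

theorem pvAdj_mem_univ (graph : List (Int × List (Int × Int))) (x z : Int)
    (hz : z ∈ (pvAdj graph x).map (fun y => y.1)) : z ∈ pvUniv graph := by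
  rw [pvUniv, PySem.Set.mem_ofList, List.mem_flatMap]
  induction graph with
  | nil =>
    simp only [pvAdj] at hz
    simp [PySem.Dict.getD_eq_get?_getD] at hz
    exact absurd hz (by simp [show (PySem.Dict.mk ([] : List (Int × List (Int × Int)))).get? x = none from rfl])
  | cons e rest ih =>
    rw [pvAdj, PySem.Dict.getD_eq_get?_getD, PySem.Dict.get?_mk_cons] at hz
    by_cases h : e.1 == x
    · rw [if_pos h] at hz
      exact ⟨e, List.mem_cons_self, hz⟩
    · rw [if_neg h] at hz
      obtain ⟨e', he', hm⟩ := ih (by rw [pvAdj, PySem.Dict.getD_eq_get?_getD]; exact hz)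
      exact ⟨e', List.mem_cons_of_mem _ he', hm⟩

theorem pvFilter_len (t : List Int) : ∀ (l : List Int), l.Nodup → t.Nodup →
    (∀ z ∈ t, z ∈ l) → (l.filter (fun z => !(decide (z ∈ t)))).length + t.length ≤ l.length := by
  induction t with
  | nil => intro l _ _ _; simp [List.length_filter_le]
  | cons z t ih =>
    intro l hl ht hsub
    have hz : z ∈ l := hsub z List.mem_cons_self
    have hzt : z ∉ t := (List.nodup_cons.mp ht).1
    have hfe : l.filter (fun x => !(decide (x ∈ z :: t)))
        = (l.erase z).filter (fun x => !(decide (x ∈ t))) := by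
      rw [List.Nodup.erase_eq_filter hl, List.filter_filter]
      apply List.filter_congr
      intro x _
      by_cases h1 : x = z <;> by_cases h2 : x ∈ t <;> simp [h1, h2]
    have hlen := ih (l.erase z) (hl.erase z) (List.nodup_cons.mp ht).2
      (fun u hu => (List.Nodup.mem_erase_iff hl).mpr ⟨fun he => hzt (he ▸ hu), hsub u (List.mem_cons_of_mem _ hu)⟩)
    have hle : (l.erase z).length = l.length - 1 := List.length_erase_of_mem hz
    have hpos : 1 ≤ l.length := List.length_pos_of_mem hz
    rw [hfe]
    simp only [List.length_cons]
    omega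

theorem pvMeasure_dec (graph : List (Int × List (Int × Int))) (node : Int)
    (dist : PySem.Dict Int Int) (w : Int) :
    2 * (((pvUniv graph).filter (fun u => !((((pvAdj graph node).foldl (pvBStep w) (dist, [])).1).contains u))).length)
      + (pvNew dist.keys (pvAdj graph node)).length
      ≤ 2 * (((pvUniv graph).filter (fun u => !(dist.contains u))).length) := by
  obtain ⟨-, hitems⟩ := pvBStep_fold w (pvAdj graph node) dist []
  have hk : ((pvAdj graph node).foldl (pvBStep w) (dist, [])).1.keys
      = dist.keys ++ pvNew dist.keys (pvAdj graph node) := by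
    simp only [PySem.Dict.keys, hitems, List.map_append, List.map_map]
    simp [Function.comp_def]
  have hcont : ∀ u, (((pvAdj graph node).foldl (pvBStep w) (dist, [])).1).contains u
      = (dist.contains u || decide (u ∈ pvNew dist.keys (pvAdj graph node))) := by
    intro u
    rw [PySem.Dict.contains_eq_decide_mem_keys, PySem.Dict.contains_eq_decide_mem_keys, hk]
    by_cases h1 : u ∈ dist.keys <;> by_cases h2 : u ∈ pvNew dist.keys (pvAdj graph node) <;>
      simp [h1, h2]
  have hfilter : (pvUniv graph).filter
        (fun u => !((((pvAdj graph node).foldl (pvBStep w) (dist, [])).1).contains u))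
      = ((pvUniv graph).filter (fun u => !(dist.contains u))).filter
          (fun u => !(decide (u ∈ pvNew dist.keys (pvAdj graph node)))) := by
    rw [List.filter_filter]
    apply List.filter_congr
    intro u _
    rw [hcont u]
    cases hdu : dist.contains u <;> simp
  have hnodup : ((pvUniv graph).filter (fun u => !(dist.contains u))).Nodup := by
    have : (pvUniv graph).Nodup := by rw [pvUniv]; exact PySem.Set.nodup_ofList _
    exact this.filter _
  have hsub : ∀ z ∈ pvNew dist.keys (pvAdj graph node),
      z ∈ (pvUniv graph).filter (fun u => !(dist.contains u)) := by
    intro z hz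
    obtain ⟨h1, h2⟩ := pvNew_mem _ _ z hz
    refine List.mem_filter.mpr ⟨pvAdj_mem_univ graph node z h1, ?_⟩
    rw [PySem.Dict.contains_eq_decide_mem_keys]
    simp [h2]
  have hlen := pvFilter_len (pvNew dist.keys (pvAdj graph node)) _ hnodup (pvNew_nodup _ _) hsub
  rw [hfilter]
  omega

-- the while loop over (queue, head): pending = queue[head:]
def pvBLoop (graph : List (Int × List (Int × Int))) (n : Int) :
    List Int → PySem.Dict Int Int → PySem.Dict Int Int
  | [], dist => dist
  | node :: rest, dist =>
    let d := dist.getD node 0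
    if d < n then
      let p := (pvAdj graph node).foldl (pvBStep (d + 1)) (dist, [])
      pvBLoop graph n (rest ++ p.2) p.1
    else pvBLoop graph n rest dist
termination_by pending dist => 2 * (((pvUniv graph).filter (fun u => !(dist.contains u))).length) + pending.length
decreasing_by
  · have h := pvBStep_fold (dist.getD node 0 + 1) (pvAdj graph node) dist []
    have hm := pvMeasure_dec graph node dist (dist.getD node 0 + 1)
    simp only [h.1, List.nil_append, List.length_append, List.length_cons]
    omega
  · simp only [List.length_cons]; omega

def actors_with_bfs_number_alt (data : List (List (Int × List (Int × Int)))) (n : Int) (actor_id : Int) : List Int :=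
  let graph := (PySem.List.pyGet? data 0).getD []   -- data[0]
  if n ≤ 0 then PySem.Set.ofList [actor_id]
  else
    let dist := PySem.Dict.mk [(actor_id, 0)]
    let final := pvBLoop graph n [actor_id] dist
    PySem.Set.ofList ((final.items.filter (fun p => decide (p.2 = n))).map (fun p => p.1))

-- ===== PRECONDITION & SPEC =====
-- Pre_ excludes the raising inputs (data = [] : IndexError; a BFS lookup of a missing key : KeyError):
-- for n > 0 the start actor must be a key of data[0] (its adjacency is always read), and for n ≥ 2 — a
-- checkable over-approximation of KeyError-freedom — every neighbour id in data[0] must again be a key;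
-- the latter can also exclude some inputs on which A returns because its BFS happens never to reach a
-- dangling neighbour within n levels.
def Pre_actors_with_bfs_number (data : List (List (Int × List (Int × Int)))) (n : Int) (actor_id : Int) : Prop :=
  data ≠ [] ∧
  (n ≤ 0 ∨
    (actor_id ∈ (((PySem.List.pyGet? data 0).getD []).map (fun e => e.1)) ∧
     (n = 1 ∨
      ∀ e ∈ ((PySem.List.pyGet? data 0).getD []), ∀ y ∈ e.2,
        y.1 ∈ (((PySem.List.pyGet? data 0).getD []).map (fun e => e.1)))))
instance (data : List (List (Int × List (Int × Int)))) (n : Int) (actor_id : Int) : Decidable (Pre_actors_with_bfs_number data n actor_id) := by unfold Pre_actors_with_bfs_number; infer_instance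

def pvWitness_actors_with_bfs_number : (List (List (Int × List (Int × Int)))) × Int × Int :=
  ([[(1, [(2, 10)]), (2, [])]], 1, 1)

def Spec_actors_with_bfs_number (data : List (List (Int × List (Int × Int)))) (n : Int) (actor_id : Int) (out : List Int) : Prop := out = actors_with_bfs_number_alt data n actor_id
instance (data : List (List (Int × List (Int × Int)))) (n : Int) (actor_id : Int) (out : List Int) : Decidable (Spec_actors_with_bfs_number data n actor_id out) := by unfold Spec_actors_with_bfs_number; infer_instance

-- ===== CLAIM (what is proved, stated in full; the proofs are below) =====
def Claim_equal_actors_with_bfs_number : Prop := ∀ (data : List (List (Int × List (Int × Int)))) (n : Int) (actor_id : Int), Dom_actors_with_bfs_number data n actor_id → Pre_actors_with_bfs_number data n actor_id → Spec_actors_with_bfs_number data n actor_id (actors_with_bfs_number data n actor_id)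

-- ===== LEMMAS AND PROOFS =====

-- canonical fresh-node list of a whole layer
def pvNewL (graph : List (Int × List (Int × Int))) (S : List Int) : List Int → List Int
  | [] => []
  | x :: xs => pvNew S (pvAdj graph x) ++ pvNewL graph (S ++ pvNew S (pvAdj graph x)) xs

theorem pvContains_eq (s : PySem.Set Int) (x : Int) :
    PySem.Set.contains s x = decide (x ∈ s) := by
  by_cases h : x ∈ s
  · simp [h, PySem.Set.contains_iff]
  · cases hc : PySem.Set.contains s x
    · simp [h]
    · exact absurd ((PySem.Set.contains_iff s x).mp hc) h

theorem pvNewL_mem (graph : List (Int × List (Int × Int))) :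
    ∀ (xs : List Int) (S : List Int), ∀ z ∈ pvNewL graph S xs, z ∉ S := by
  intro xs
  induction xs with
  | nil => intro S z hz; simp [pvNewL] at hz
  | cons x xs ih =>
    intro S z hz
    simp only [pvNewL] at hz
    rcases List.mem_append.mp hz with h | h
    · exact (pvNew_mem _ _ z h).2
    · intro hc; exact ih _ z h (by simp [hc])

theorem pvNewL_nodup (graph : List (Int × List (Int × Int))) :
    ∀ (xs : List Int) (S : List Int), (pvNewL graph S xs).Nodup := by
  intro xs
  induction xs with
  | nil => intro S; simp [pvNewL]
  | cons x xs ih =>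
    intro S
    simp only [pvNewL]
    refine List.Nodup.append (pvNew_nodup _ _) (ih _) ?_
    intro a ha hb
    exact pvNewL_mem graph xs _ a hb (by simp [ha])

-- A's per-node set union, reduced to the canonical fresh list
theorem pvA_core (seen : List Int) (adj : List (Int × Int)) :
    ∀ (nl : List Int),
      (PySem.Set.ofList ((adj.filter (fun y => !(PySem.Set.contains seen y.1))).map (fun y => y.1))).filter
        (fun z => !(PySem.Set.contains nl z)) = pvNew (seen ++ nl) adj := by
  induction adj with
  | nil => intro nl; simp [pvNew, PySem.Set.ofList]
  | cons y adj ih =>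
    intro nl
    by_cases h1 : y.1 ∈ seen
    · have hc : PySem.Set.contains seen y.1 = true := (PySem.Set.contains_iff _ _).mpr h1
      have hf : List.filter (fun y => !(PySem.Set.contains seen y.1)) (y :: adj)
          = List.filter (fun y => !(PySem.Set.contains seen y.1)) adj := by
        rw [List.filter_cons]; simp [h1]
      rw [hf]
      simp only [pvNew]
      rw [if_pos (List.mem_append_left _ h1)]
      exact ih nl
    · have hcf : PySem.Set.contains seen y.1 = false := by
        cases hc : PySem.Set.contains seen y.1
        · rfl
        · exact absurd ((PySem.Set.contains_iff _ _).mp hc) h1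
      have hf : List.filter (fun y => !(PySem.Set.contains seen y.1)) (y :: adj)
          = y :: List.filter (fun y => !(PySem.Set.contains seen y.1)) adj := by
        rw [List.filter_cons]; simp [h1]
      rw [hf]
      simp only [List.map_cons]
      rw [PySem.Set.ofList_cons]
      simp only [pvNew]
      by_cases h2 : y.1 ∈ nl
      · have hq : (!(PySem.Set.contains nl y.1)) = false := by simp [pvContains_eq, h2]
        rw [List.filter_cons]
        simp only [hq, if_neg]
        rw [if_pos (List.mem_append_right _ h2), ← ih nl]
        show (List.filter (fun z => !(z == y.1)) (PySem.Set.ofList _)).filter (fun z => !(PySem.Set.contains nl z)) = _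
        rw [List.filter_filter]
        apply List.filter_congr
        intro z _
        by_cases hz : z = y.1 <;> simp [hz, h2]
      · have hq : (!(PySem.Set.contains nl y.1)) = true := by simp [pvContains_eq, h2]
        rw [List.filter_cons]
        simp only [hq, if_pos]
        rw [if_neg (by simp [h1, h2])]
        rw [show (seen ++ nl) ++ [y.1] = seen ++ (nl ++ [y.1]) from List.append_assoc _ _ _, ← ih (nl ++ [y.1])]
        congr 1
        show (List.filter (fun z => !(z == y.1)) (PySem.Set.ofList _)).filter (fun z => !(PySem.Set.contains nl z)) = _
        rw [List.filter_filter]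
        apply List.filter_congr
        intro z _
        by_cases hz : z = y.1 <;> by_cases hzn : z ∈ nl <;> simp [hz, hzn]

-- A's layer fold equals the canonical layer list
theorem pvA_layer (graph : List (Int × List (Int × Int))) (seen : List Int) :
    ∀ (xs nl : List Int),
      xs.foldl (fun new_level x =>
        PySem.Set.union new_level (PySem.Set.ofList
          (((pvAdj graph x).filter (fun y => !(PySem.Set.contains seen y.1))).map (fun y => y.1)))) nl
      = nl ++ pvNewL graph (seen ++ nl) xs := by
  intro xs
  induction xs with
  | nil => intro nl; simp [pvNewL]
  | cons x xs ih =>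
    intro nl
    simp only [List.foldl_cons, pvNewL]
    rw [show PySem.Set.union nl (PySem.Set.ofList
          (((pvAdj graph x).filter (fun y => !(PySem.Set.contains seen y.1))).map (fun y => y.1)))
        = PySem.Set.update nl (PySem.Set.ofList
          (((pvAdj graph x).filter (fun y => !(PySem.Set.contains seen y.1))).map (fun y => y.1))) from rfl]
    rw [PySem.Set.update_eq_append_filter, PySem.Set.ofList_ofList, pvA_core]
    rw [ih (nl ++ pvNew (seen ++ nl) (pvAdj graph x))]
    simp [List.append_assoc]

-- B's queue, processing one whole layer
theorem pvB_layer (graph : List (Int × List (Int × Int))) (n : Int) (d : Int) (hdn : d < n) :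
    ∀ (xs acc : List Int) (dist : PySem.Dict Int Int), dist.keys.Nodup →
      (∀ x ∈ xs, dist.get? x = some d) →
      ∃ dist', pvBLoop graph n (xs ++ acc) dist = pvBLoop graph n (acc ++ pvNewL graph dist.keys xs) dist' ∧
        dist'.items = dist.items ++ (pvNewL graph dist.keys xs).map (fun z => (z, d + 1)) := by
  intro xs
  induction xs with
  | nil => intro acc dist hnd hlev; exact ⟨dist, by simp [pvNewL], by simp [pvNewL]⟩
  | cons x xs ih =>
    intro acc dist hnd hlev
    have hgx : dist.getD x 0 = d := by
      rw [PySem.Dict.getD_eq_get?_getD, hlev x List.mem_cons_self]; rfl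
    obtain ⟨h2a, h2b⟩ := pvBStep_fold (d + 1) (pvAdj graph x) dist []
    have hkeys : ((pvAdj graph x).foldl (pvBStep (d + 1)) (dist, [])).1.keys
        = dist.keys ++ pvNew dist.keys (pvAdj graph x) := by
      simp only [PySem.Dict.keys, h2b, List.map_append, List.map_map]
      simp [Function.comp_def]
    have hnd' : ((pvAdj graph x).foldl (pvBStep (d + 1)) (dist, [])).1.keys.Nodup := by
      rw [hkeys]
      refine List.Nodup.append hnd (pvNew_nodup _ _) ?_
      intro a ha hb; exact (pvNew_mem _ _ a hb).2 ha
    have hlev' : ∀ x' ∈ xs, ((pvAdj graph x).foldl (pvBStep (d + 1)) (dist, [])).1.get? x' = some d := by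
      intro x' hx'
      have hmem : (x', d) ∈ dist.items :=
        PySem.Dict.mem_items_of_get?_eq_some _ (hlev x' (List.mem_cons_of_mem _ hx'))
      exact PySem.Dict.get?_of_mem_items _ (by rw [h2b]; exact List.mem_append_left _ hmem) hnd'
    obtain ⟨dist', hA, hB⟩ := ih (acc ++ pvNew dist.keys (pvAdj graph x)) _ hnd' hlev'
    refine ⟨dist', ?_, ?_⟩
    · have hstep : pvBLoop graph n ((x :: xs) ++ acc) dist
          = pvBLoop graph n ((xs ++ acc) ++ pvNew dist.keys (pvAdj graph x))
              ((pvAdj graph x).foldl (pvBStep (d + 1)) (dist, [])).1 := by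
        show pvBLoop graph n (x :: (xs ++ acc)) dist = _
        simp only [pvBLoop]
        rw [hgx, if_pos hdn, h2a]
        simp
      rw [hstep, show ((xs ++ acc) ++ pvNew dist.keys (pvAdj graph x))
            = xs ++ (acc ++ pvNew dist.keys (pvAdj graph x)) from by simp [List.append_assoc], hA, hkeys]
      simp [pvNewL, List.append_assoc]
    · rw [hB, h2b, hkeys]
      simp [pvNewL, List.append_assoc]

theorem pvB_drain (graph : List (Int × List (Int × Int))) (n : Int) :
    ∀ (xs : List Int) (dist : PySem.Dict Int Int),
      (∀ x ∈ xs, dist.get? x = some n) → pvBLoop graph n xs dist = dist := by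
  intro xs
  induction xs with
  | nil => intro dist _; simp [pvBLoop]
  | cons x xs ih =>
    intro dist h
    have hgx : dist.getD x 0 = n := by
      rw [PySem.Dict.getD_eq_get?_getD, h x List.mem_cons_self]; rfl
    simp only [pvBLoop]
    rw [hgx, if_neg (lt_irrefl n)]
    exact ih dist (fun x' hx' => h x' (List.mem_cons_of_mem _ hx'))

-- main invariant: A's remaining-k layered loop against B's queue from a layer boundary
theorem pvMain (graph : List (Int × List (Int × Int))) (n : Int) :
    ∀ (k : Nat) (level : List Int) (dist : PySem.Dict Int Int) (d : Int),
      d + (k : Int) = n →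
      dist.keys.Nodup →
      (∀ x ∈ level, dist.get? x = some d) →
      (∀ p ∈ dist.items, p.2 ≤ d) →
      dist.items.filter (fun p => decide (p.2 = d)) = level.map (fun x => (x, d)) →
      pvALoop graph k level dist.keys
        = PySem.Set.ofList (((pvBLoop graph n level dist).items.filter (fun p => decide (p.2 = n))).map (fun p => p.1)) := by
  intro k
  induction k with
  | zero =>
    intro level dist d hdk hnd hlev hval hex
    have hd : d = n := by simpa using hdk
    rw [pvB_drain graph n level dist (fun x hx => by rw [hlev x hx, hd])]
    simp only [pvALoop]
    rw [← hd, hex]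
    have hsub : level.Sublist dist.keys := by
      have h1 : (level.map (fun x => (x, d))).Sublist dist.items := by
        rw [← hex]; exact List.filter_sublist
      have h2 := h1.map Prod.fst
      simpa [List.map_map, Function.comp_def, PySem.Dict.keys] using h2
    have hnl : level.Nodup := hsub.nodup hnd
    simp [List.map_map, Function.comp_def, PySem.Set.ofList_eq_self_of_nodup _ hnl]
  | succ k ih =>
    intro level dist d hdk hnd hlev hval hex
    have hdlt : d < n := by push_cast at hdk; omega
    have hexp : pvAExpand graph dist.keys level = pvNewL graph dist.keys level := by
      rw [pvAExpand, pvA_layer]; simp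
    obtain ⟨dist', hB1, hB2⟩ := pvB_layer graph n d hdlt level [] dist hnd hlev
    rw [List.append_nil, List.nil_append] at hB1
    simp only [pvALoop, hexp]
    by_cases ht : pvNewL graph dist.keys level = []
    · rw [if_pos ht, hB1, ht]
      have hempty : pvBLoop graph n [] dist' = dist' := by simp [pvBLoop]
      rw [hempty]
      have hfe : dist'.items.filter (fun p => decide (p.2 = n)) = [] := by
        apply List.filter_eq_nil_iff.mpr
        intro p hp
        have hpm : p ∈ dist.items := by rw [hB2, ht] at hp; simpa using hp
        have := hval _ hpm
        simp only [decide_eq_true_eq]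
        omega
      rw [hfe]
      rfl
    · rw [if_neg ht]
      have hun : PySem.Set.union dist.keys (pvNewL graph dist.keys level)
          = dist.keys ++ pvNewL graph dist.keys level := by
        rw [show PySem.Set.union dist.keys (pvNewL graph dist.keys level)
              = PySem.Set.update dist.keys (pvNewL graph dist.keys level) from rfl]
        exact PySem.Set.update_eq_append_of_disjoint _ _ (pvNewL_nodup graph level dist.keys)
          (fun z hz => pvNewL_mem graph level dist.keys z hz)
      have hk' : dist'.keys = dist.keys ++ pvNewL graph dist.keys level := by
        simp only [PySem.Dict.keys, hB2, List.map_append, List.map_map]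
        simp [Function.comp_def]
      rw [hun, ← hk', hB1]
      apply ih (pvNewL graph dist.keys level) dist' (d + 1)
      · push_cast at hdk ⊢; omega
      · rw [hk']
        refine List.Nodup.append hnd (pvNewL_nodup graph level dist.keys) ?_
        intro a ha hb
        exact pvNewL_mem graph level dist.keys a hb ha
      · intro z hz
        refine PySem.Dict.get?_of_mem_items _ ?_ (by rw [hk']; refine List.Nodup.append hnd (pvNewL_nodup graph level dist.keys) (fun a ha hb => pvNewL_mem graph level dist.keys a hb ha))
        rw [hB2]
        exact List.mem_append_right _ (List.mem_map.mpr ⟨z, hz, rfl⟩)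
      · intro p hp
        rw [hB2] at hp
        rcases List.mem_append.mp hp with h | h
        · have := hval p h; omega
        · obtain ⟨z, _, hzp⟩ := List.mem_map.mp h
          rw [← hzp]
      · rw [hB2, List.filter_append]
        have h1 : dist.items.filter (fun p => decide (p.2 = d + 1)) = [] := by
          apply List.filter_eq_nil_iff.mpr
          intro p hp
          have := hval p hp
          simp only [decide_eq_true_eq]
          omega
        have h2 : ((pvNewL graph dist.keys level).map (fun z => (z, d + 1))).filter
              (fun p => decide (p.2 = d + 1))
            = (pvNewL graph dist.keys level).map (fun z => (z, d + 1)) := by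
          apply List.filter_eq_self.mpr
          intro p hp
          obtain ⟨z, _, hzp⟩ := List.mem_map.mp hp
          rw [← hzp]
          simp
        rw [h1, h2, List.nil_append]

-- ===== VERDICT (by name: the statement is the Claim_ definition above) =====
theorem actors_with_bfs_number_spec : Claim_equal_actors_with_bfs_number := by
  intro data n actor_id _hdom _hpre
  unfold Spec_actors_with_bfs_number
  simp only [actors_with_bfs_number, actors_with_bfs_number_alt]
  by_cases hn : n ≤ 0
  · rw [if_pos hn]
    have h0 : n.toNat = 0 := Int.toNat_of_nonpos hn
    rw [h0]
    rfl
  · rw [if_neg hn]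
    have h0 : (0 : Int) < n := by omega
    have h1 : (0 : Int) + ((n.toNat : Nat) : Int) = n := by
      rw [Int.toNat_of_nonneg (le_of_lt h0)]; omega
    have h2 : (PySem.Dict.mk [(actor_id, (0 : Int))]).keys.Nodup := by
      simp [PySem.Dict.keys]
    have h3 : ∀ x ∈ [actor_id], (PySem.Dict.mk [(actor_id, (0 : Int))]).get? x = some 0 := by
      intro x hx
      have : x = actor_id := by simpa using hx
      subst this
      rw [PySem.Dict.get?_mk_cons]
      simp
    have h4 : ∀ p ∈ (PySem.Dict.mk [(actor_id, (0 : Int))]).items, p.2 ≤ 0 := by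
      intro p hp
      have : p = (actor_id, (0 : Int)) := by simpa using hp
      rw [this]
    have h5 : (PySem.Dict.mk [(actor_id, (0 : Int))]).items.filter (fun p => decide (p.2 = 0))
        = [actor_id].map (fun x => (x, (0 : Int))) := by
      simp
    have hmain := pvMain ((PySem.List.pyGet? data 0).getD []) n n.toNat [actor_id]
      (PySem.Dict.mk [(actor_id, 0)]) 0 h1 h2 h3 h4 h5
    have hk : (PySem.Dict.mk [(actor_id, (0 : Int))]).keys = [actor_id] := rfl
    rw [hk] at hmain
    have ha : PySem.Set.add PySem.Set.empty actor_id = [actor_id] := rfl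
    rw [ha]
    exact hmain
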